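-- pv_equiv track=rewrite | github.com/lastsecondsave/sublemon | Sublemon/commands.py | find_open_brace_position
-- ===== SOURCE A (Python) =====
-- def find_open_brace_position(text):
--     counters = {("[", "]"): 0, ("{", "}"): 0, ("(", ")"): 0}
--
--     for i in reversed(range(len(text))):
--         for chars, counter in counters.items():
--             if text[i] == chars[0]:
--                 counter -= 1
--             elif text[i] == chars[1]:
--                 counter += 1
--
--             if counter == -1:
--                 return i
--
--             counters[chars] = counter
--
--     return -1
-- ===== SOURCE B (Python) =====
-- def find_open_brace_position(text):
--     stacks = {"[]": [], "{}": [], "()": []}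
--
--     for i, ch in enumerate(text):
--         for pair, stack in stacks.items():
--             if ch == pair[0]:
--                 stack.append(i)
--             elif ch == pair[1] and stack:
--                 stack.pop()
--
--     best = -1
--     for stack in stacks.values():
--         if stack:
--             best = max(best, stack[-1])
--     return best
-- ===== Notes on version B (the rewrite author's own statement) =====
-- stated objective: alternative
-- what changed: Replaces the backward counter scan with early return by a forward left-to-right pass maintaining a stack of indices per bracket type (close pops if non-empty) and returning the maximum index left on any stack, -1 if none.
import Mathlib
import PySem

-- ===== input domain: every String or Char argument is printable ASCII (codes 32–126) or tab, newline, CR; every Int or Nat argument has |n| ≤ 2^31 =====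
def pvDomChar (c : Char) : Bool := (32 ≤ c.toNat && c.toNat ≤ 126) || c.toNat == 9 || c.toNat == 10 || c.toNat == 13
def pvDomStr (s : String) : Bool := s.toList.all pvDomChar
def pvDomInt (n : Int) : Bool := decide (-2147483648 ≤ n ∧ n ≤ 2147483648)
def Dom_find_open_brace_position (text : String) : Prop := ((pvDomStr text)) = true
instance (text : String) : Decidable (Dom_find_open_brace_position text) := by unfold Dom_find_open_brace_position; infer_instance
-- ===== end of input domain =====

-- B replaces A's backward counter scan (early return) by a forward pass with per-type
-- index stacks and a final max over stack tops; same O(n) cost, different algorithm.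

-- ===== PORT A =====
-- one counter update of A's inner loop for the pair (o, c)
def pvStep (o c : Char) (k : Int) (ch : Char) : Int :=
  if ch = o then k - 1 else if ch = c then k + 1 else k

-- A's outer loop: the chars are fed in right-to-left order, i is the current index
def pvGoA : List Char → Int → Int × Int × Int → Int
  | [], _, _ => -1
  | ch :: rest, i, (k1, k2, k3) =>
    let k1' := pvStep '[' ']' k1 ch
    if k1' = -1 then i else
    let k2' := pvStep '{' '}' k2 ch
    if k2' = -1 then i else
    let k3' := pvStep '(' ')' k3 ch
    if k3' = -1 then i else
    pvGoA rest (i - 1) (k1', k2', k3')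

def find_open_brace_position (text : String) : Int :=
  pvGoA text.toList.reverse ((text.toList.length : Int) - 1) (0, 0, 0)

-- ===== PORT B =====
-- B's inner loop body for one pair (o, c): push index on open, pop on close if non-empty
def pvPush (o c : Char) (st : List Int) (i : Int) (ch : Char) : List Int :=
  if ch = o then st ++ [i]
  else if ch = c ∧ st ≠ [] then st.dropLast
  else st

-- B's forward enumerate loop over the three stacks
def pvGoB : List Char → Int → List Int × List Int × List Int → List Int × List Int × List Int
  | [], _, s => s
  | ch :: rest, i, (s1, s2, s3) =>
    pvGoB rest (i + 1) (pvPush '[' ']' s1 i ch, pvPush '{' '}' s2 i ch, pvPush '(' ')' s3 i ch)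

-- B's final loop: best = max(best, stack[-1]) for each non-empty stack
def pvBest (best : Int) (st : List Int) : Int :=
  match st.getLast? with
  | some t => max best t
  | none => best

def find_open_brace_position_alt (text : String) : Int :=
  let s := pvGoB text.toList 0 ([], [], [])
  pvBest (pvBest (pvBest (-1) s.1) s.2.1) s.2.2

-- ===== PRECONDITION & SPEC =====
def Spec_find_open_brace_position (text : String) (out : Int) : Prop := out = find_open_brace_position_alt text
instance (text : String) (out : Int) : Decidable (Spec_find_open_brace_position text out) := by unfold Spec_find_open_brace_position; infer_instance

-- ===== CLAIM (what is proved, stated in full; the proofs are below) =====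
def Claim_equal_find_open_brace_position : Prop := ∀ (text : String), Dom_find_open_brace_position text → Spec_find_open_brace_position text (find_open_brace_position text)

-- ===== LEMMAS AND PROOFS =====

-- single-type backward scan, chars in right-to-left order (what pvGoA does for one type)
def pvBgo (o c : Char) : List Char → Int → Int → Option Int
  | [], _, _ => none
  | ch :: rest, i, k =>
    let k' := pvStep o c k ch
    if k' = -1 then some i else pvBgo o c rest (i - 1) k'

-- single-type forward scan with a cons-stack (head = top)
def pvFwdC (o c : Char) : List Char → Int → List Int → List Int
  | [], _, st => st
  | ch :: rest, i, st =>
    pvFwdC o c rest (i + 1) (if ch = o then i :: st else if ch = c then st.tail else st)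

-- single-type forward scan with B's append-stack
def pvFwd (o c : Char) : List Char → Int → List Int → List Int
  | [], _, st => st
  | ch :: rest, i, st => pvFwd o c rest (i + 1) (pvPush o c st i ch)

def pvToInt : Option Int → Int
  | none => -1
  | some n => n

theorem pvBgo_le (o c : Char) : ∀ (l : List Char) (i k j : Int),
    pvBgo o c l i k = some j → j ≤ i := by
  intro l
  induction l with
  | nil => intro i k j h; simp [pvBgo] at h
  | cons ch rest ih =>
    intro i k j h
    simp only [pvBgo] at h
    split at h
    · cases h; omega
    · have := ih (i - 1) _ j h
      omega

theorem pvGoA_eq_max : ∀ (l : List Char) (i k1 k2 k3 : Int),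
    0 ≤ k1 → 0 ≤ k2 → 0 ≤ k3 → i = (l.length : Int) - 1 →
    pvGoA l i (k1, k2, k3) =
      max (max (max (-1) (pvToInt (pvBgo '[' ']' l i k1)))
        (pvToInt (pvBgo '{' '}' l i k2))) (pvToInt (pvBgo '(' ')' l i k3)) := by
  intro l
  induction l with
  | nil =>
    intro i k1 k2 k3 _ _ _ _
    simp [pvGoA, pvBgo, pvToInt]
  | cons ch rest ih =>
    intro i k1 k2 k3 h1 h2 h3 hi
    have hi0 : i = (rest.length : Int) := by simp at hi; omega
    have hipos : 0 ≤ i := by omega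
    have hbnd : ∀ (o c : Char) (k : Int), pvToInt (pvBgo o c rest (i - 1) k) ≤ i - 1 := by
      intro o c k
      cases hr : pvBgo o c rest (i - 1) k with
      | none => simp [pvToInt]; omega
      | some j => have := pvBgo_le o c rest (i - 1) k j hr; simpa [pvToInt]
    by_cases hc1 : pvStep '[' ']' k1 ch = -1
    · have hch : ch = '[' := by
        unfold pvStep at hc1; split_ifs at hc1 <;> first | assumption | omega
      subst hch
      have hne2 : ¬ (k2 = -1) := by omega
      have hne3 : ¬ (k3 = -1) := by omega
      have L : pvGoA ('[' :: rest) i (k1, k2, k3) = i := by simp [pvGoA, hc1]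
      have R1 : pvBgo '[' ']' ('[' :: rest) i k1 = some i := by simp [pvBgo, hc1]
      have R2 : pvBgo '{' '}' ('[' :: rest) i k2 = pvBgo '{' '}' rest (i - 1) k2 := by
        simp [pvBgo, pvStep, hne2]
      have R3 : pvBgo '(' ')' ('[' :: rest) i k3 = pvBgo '(' ')' rest (i - 1) k3 := by
        simp [pvBgo, pvStep, hne3]
      rw [L, R1, R2, R3]
      have b2 := hbnd '{' '}' k2
      have b3 := hbnd '(' ')' k3
      rw [show pvToInt (some i) = i from rfl]
      generalize pvToInt (pvBgo '{' '}' rest (i - 1) k2) = v2 at b2 ⊢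
      generalize pvToInt (pvBgo '(' ')' rest (i - 1) k3) = v3 at b3 ⊢
      omega
    · by_cases hc2 : pvStep '{' '}' k2 ch = -1
      · have hch : ch = '{' := by
          unfold pvStep at hc2; split_ifs at hc2 <;> first | assumption | omega
        subst hch
        have hk2 : k2 = 0 := by simp [pvStep] at hc2; omega
        subst hk2
        have hne1 : ¬ (k1 = -1) := by omega
        have hne3 : ¬ (k3 = -1) := by omega
        have L : pvGoA ('{' :: rest) i (k1, 0, k3) = i := by simp [pvGoA, pvStep, hne1]
        have R1 : pvBgo '[' ']' ('{' :: rest) i k1 = pvBgo '[' ']' rest (i - 1) k1 := by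
          simp [pvBgo, pvStep, hne1]
        have R2 : pvBgo '{' '}' ('{' :: rest) i 0 = some i := by simp [pvBgo, pvStep]
        have R3 : pvBgo '(' ')' ('{' :: rest) i k3 = pvBgo '(' ')' rest (i - 1) k3 := by
          simp [pvBgo, pvStep, hne3]
        rw [L, R1, R2, R3]
        have b1 := hbnd '[' ']' k1
        have b3 := hbnd '(' ')' k3
        rw [show pvToInt (some i) = i from rfl]
        generalize pvToInt (pvBgo '[' ']' rest (i - 1) k1) = v1 at b1 ⊢
        generalize pvToInt (pvBgo '(' ')' rest (i - 1) k3) = v3 at b3 ⊢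
        omega
      · by_cases hc3 : pvStep '(' ')' k3 ch = -1
        · have hch : ch = '(' := by
            unfold pvStep at hc3; split_ifs at hc3 <;> first | assumption | omega
          subst hch
          have hk3 : k3 = 0 := by simp [pvStep] at hc3; omega
          subst hk3
          have hne1 : ¬ (k1 = -1) := by omega
          have hne2 : ¬ (k2 = -1) := by omega
          have L : pvGoA ('(' :: rest) i (k1, k2, 0) = i := by
            simp [pvGoA, pvStep, hne1, hne2]
          have R1 : pvBgo '[' ']' ('(' :: rest) i k1 = pvBgo '[' ']' rest (i - 1) k1 := by
            simp [pvBgo, pvStep, hne1]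
          have R2 : pvBgo '{' '}' ('(' :: rest) i k2 = pvBgo '{' '}' rest (i - 1) k2 := by
            simp [pvBgo, pvStep, hne2]
          have R3 : pvBgo '(' ')' ('(' :: rest) i 0 = some i := by simp [pvBgo, pvStep]
          rw [L, R1, R2, R3]
          have b1 := hbnd '[' ']' k1
          have b2 := hbnd '{' '}' k2
          rw [show pvToInt (some i) = i from rfl]
          generalize pvToInt (pvBgo '[' ']' rest (i - 1) k1) = v1 at b1 ⊢
          generalize pvToInt (pvBgo '{' '}' rest (i - 1) k2) = v2 at b2 ⊢
          omega
        · have g1 : 0 ≤ pvStep '[' ']' k1 ch := by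
            unfold pvStep at hc1 ⊢; split_ifs at hc1 ⊢ <;> omega
          have g2 : 0 ≤ pvStep '{' '}' k2 ch := by
            unfold pvStep at hc2 ⊢; split_ifs at hc2 ⊢ <;> omega
          have g3 : 0 ≤ pvStep '(' ')' k3 ch := by
            unfold pvStep at hc3 ⊢; split_ifs at hc3 ⊢ <;> omega
          have L : pvGoA (ch :: rest) i (k1, k2, k3) =
              pvGoA rest (i - 1) (pvStep '[' ']' k1 ch, pvStep '{' '}' k2 ch,
                pvStep '(' ')' k3 ch) := by
            simp [pvGoA, hc1, hc2, hc3]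
          have R1 : pvBgo '[' ']' (ch :: rest) i k1 =
              pvBgo '[' ']' rest (i - 1) (pvStep '[' ']' k1 ch) := by simp [pvBgo, hc1]
          have R2 : pvBgo '{' '}' (ch :: rest) i k2 =
              pvBgo '{' '}' rest (i - 1) (pvStep '{' '}' k2 ch) := by simp [pvBgo, hc2]
          have R3 : pvBgo '(' ')' (ch :: rest) i k3 =
              pvBgo '(' ')' rest (i - 1) (pvStep '(' ')' k3 ch) := by simp [pvBgo, hc3]
          rw [L, R1, R2, R3]
          exact ih (i - 1) _ _ _ g1 g2 g3 (by omega)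

-- forward append-stack = reverse of the cons-stack
theorem dropLast_rev (l : List Int) : l.dropLast.reverse = l.reverse.tail := by
  induction l using List.reverseRecOn with
  | nil => rfl
  | append_singleton l a ih => simp

theorem pvFwd_eq_rev (o c : Char) : ∀ (l : List Char) (i : Int) (st : List Int),
    pvFwd o c l i st = (pvFwdC o c l i st.reverse).reverse := by
  intro l
  induction l with
  | nil => intro i st; simp [pvFwd, pvFwdC]
  | cons ch rest ih =>
    intro i st
    have key : (pvPush o c st i ch).reverse =
        (if ch = o then i :: st.reverse else if ch = c then st.reverse.tail else st.reverse) := by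
      by_cases ho : ch = o
      · simp [pvPush, ho]
      · by_cases hc2 : ch = c
        · by_cases hst : st = []
          · subst hst
            have hco : ¬ (c = o) := fun h => ho (hc2.trans h)
            simp [pvPush, hc2, hco]
          · unfold pvPush
            rw [if_neg ho, if_pos (show ch = c ∧ st ≠ [] from ⟨hc2, hst⟩),
              if_neg ho, if_pos hc2]
            exact dropLast_rev st
        · simp [pvPush, ho, hc2]
    calc pvFwd o c (ch :: rest) i st
        = pvFwd o c rest (i + 1) (pvPush o c st i ch) := rfl
      _ = (pvFwdC o c rest (i + 1) (pvPush o c st i ch).reverse).reverse := ih _ _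
      _ = (pvFwdC o c (ch :: rest) i st.reverse).reverse := by rw [key]; rfl

theorem pvFwdC_append (o c : Char) : ∀ (l : List Char) (a : Char) (i : Int) (st : List Int),
    pvFwdC o c (l ++ [a]) i st =
      (if a = o then (i + l.length) :: pvFwdC o c l i st
       else if a = c then (pvFwdC o c l i st).tail else pvFwdC o c l i st) := by
  intro l
  induction l with
  | nil => intro a i st; simp [pvFwdC]
  | cons ch rest ih =>
    intro a i st
    simp only [List.cons_append, pvFwdC, ih, List.length_cons]
    split_ifs <;> first | rfl | (congr 1; omega)

-- the bridge: the backward scan with counter k finds the (k+1)-th element from the top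
-- of the forward stack
theorem pvBgo_eq_fwdC (o c : Char) : ∀ (l : List Char) (k : Nat),
    pvBgo o c l.reverse ((l.length : Int) - 1) (k : Int) = (pvFwdC o c l 0 [])[k]? := by
  intro l
  induction l using List.reverseRecOn with
  | nil => intro k; simp [pvBgo, pvFwdC]
  | append_singleton l a ih =>
    intro k
    rw [pvFwdC_append]
    have hlen' : ((l ++ [a]).length : Int) - 1 - 1 = (l.length : Int) - 1 := by simp
    simp only [List.reverse_append, List.reverse_singleton, List.singleton_append]
    by_cases ho : a = o
    · rw [if_pos ho]
      cases k with
      | zero =>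
        have hstep : pvStep o c ((0 : Nat) : Int) a = -1 := by simp [pvStep, ho]
        simp only [pvBgo, hstep]
        simp only [if_true, List.getElem?_cons_zero, List.length_append,
          List.length_singleton]
        congr 1
        push_cast
        omega
      | succ j =>
        have hstep : pvStep o c ((j + 1 : Nat) : Int) a = (j : Int) := by
          simp [pvStep, ho]
        have hne : ¬ ((j : Int) = -1) := by omega
        simp only [pvBgo, hstep]
        rw [if_neg hne, hlen', ih j, List.getElem?_cons_succ]
    · rw [if_neg ho]
      by_cases hc : a = c
      · rw [if_pos hc]
        have hco : ¬ (c = o) := fun h => ho (hc.trans h)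
        have hstep : pvStep o c (k : Int) a = (k : Int) + 1 := by simp [pvStep, hc, hco]
        have hne : ¬ ((k : Int) + 1 = -1) := by omega
        have hcast : ((k : Int) + 1) = ((k + 1 : Nat) : Int) := by push_cast; ring
        simp only [pvBgo, hstep]
        rw [if_neg hne, hlen', hcast, ih (k + 1)]
        cases pvFwdC o c l 0 [] with
        | nil => simp
        | cons x xs => simp
      · rw [if_neg hc]
        have hstep : pvStep o c (k : Int) a = (k : Int) := by simp [pvStep, ho, hc]
        have hne : ¬ ((k : Int) = -1) := by omega
        simp only [pvBgo, hstep]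
        rw [if_neg hne, hlen', ih k]

-- B's combined pass is the three single-type passes
theorem pvGoB_split : ∀ (l : List Char) (i : Int) (s1 s2 s3 : List Int),
    pvGoB l i (s1, s2, s3) =
      (pvFwd '[' ']' l i s1, pvFwd '{' '}' l i s2, pvFwd '(' ')' l i s3) := by
  intro l
  induction l with
  | nil => intro i s1 s2 s3; rfl
  | cons ch rest ih => intro i s1 s2 s3; simp [pvGoB, pvFwd, ih]

theorem pvBest_ge (best : Int) (st : List Int) (h : -1 ≤ best) : -1 ≤ pvBest best st := by
  unfold pvBest
  cases st.getLast? with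
  | none => exact h
  | some t => exact le_trans h (le_max_left _ _)

theorem pvBest_eq (best : Int) (st : List Int) (h : -1 ≤ best) :
    pvBest best st = max best (pvToInt st.getLast?) := by
  unfold pvBest
  cases st.getLast? with
  | none => simp [pvToInt]; omega
  | some t => simp [pvToInt]

-- ===== VERDICT (by name: the statement is the Claim_ definition above) =====
theorem find_open_brace_position_spec : Claim_equal_find_open_brace_position := by
  intro text _
  unfold Spec_find_open_brace_position find_open_brace_position find_open_brace_position_alt
  set L := text.toList with hL
  have hrev : ((L.reverse.length : Int) - 1) = ((L.length : Int) - 1) := by simp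
  rw [pvGoA_eq_max L.reverse ((L.length : Int) - 1) 0 0 0 le_rfl le_rfl le_rfl (by simp)]
  have hbr : ∀ (o c : Char),
      pvBgo o c L.reverse ((L.length : Int) - 1) 0 = (pvFwdC o c L 0 []).head? := by
    intro o c
    have := pvBgo_eq_fwdC o c L 0
    simpa [← List.head?_eq_getElem?] using this
  rw [pvGoB_split, hbr, hbr, hbr]
  dsimp only
  have hfw : ∀ (o c : Char),
      (pvFwd o c L 0 []).getLast? = (pvFwdC o c L 0 []).head? := by
    intro o c
    rw [pvFwd_eq_rev]
    simp
  rw [pvBest_eq _ _ (pvBest_ge _ _ (pvBest_ge _ _ le_rfl)),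
    pvBest_eq _ _ (pvBest_ge _ _ le_rfl), pvBest_eq _ _ le_rfl]
  rw [hfw, hfw, hfw]
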